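-- pv_equiv track=rewrite | github.com/Yashpriya-BDB2024/BDBP106_scripts | Lab-23/lab-23_ex1_Yashpriya.py | display_key_presses
-- ===== SOURCE A (Python) =====
-- def display_key_presses(message):
--     key_presses_dict = {
--         ".": "1", ",": "11", "?": "111", "!": "1111", ":": "11111",
--         "A": "2", "B": "22", "C": "222",
--         "D": "3", "E": "33", "F": "333",
--         "G": "4", "H": "44", "I": "444",
--         "J": "5", "K": "55", "L": "555",
--         "M": "6", "N": "66", "O": "666",
--         "P": "7", "Q": "77", "R": "777", "S": "7777",
--         "T": "8", "U": "88", "V": "888",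
--         "W": "9", "X": "99", "Y": "999", "Z": "9999",
--         " ": "0"
--     }
--     message=message.upper()
--     result=''.join([key_presses_dict[char] for char in message if char in key_presses_dict])   # ''.join - to concatenate strings
--     return result
-- ===== SOURCE B (Python) =====
-- def display_key_presses(message):
--     out = []
--     for ch in message.upper():
--         if ch == ' ':
--             out.append('0')
--         elif 'A' <= ch <= 'Z':
--             # closed-form keypad arithmetic: letters sit on keys 2-9 in groups
--             # of three, except that S and Z are the 4th press of keys 7 and 9.
--             i = ord(ch) - 65
--             if i == 18:
--                 out.append('7777')
--             elif i == 25: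
--                 out.append('9999')
--             else:
--                 j = i - 1 if i > 18 else i
--                 out.append(str(2 + j // 3) * (j % 3 + 1))
--         else:
--             p = '.,?!:'.find(ch)
--             if p != -1:
--                 out.append('1' * (p + 1))
--     return ''.join(out)
-- ===== Notes on version B (the rewrite author's own statement) =====
-- stated objective: alternative
-- what changed: Replaced the 33-entry char-to-keypress table with closed-form keypad arithmetic: an uppercase letter's digit and press count are computed from its character code (key = 2 + j//3, presses = j%3 + 1, with S and Z as the fourth press of keys 7 and 9), space and punctuation handled by a position formula on the five-symbol punctuation row; no lookup table exists.
import Mathlib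
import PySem

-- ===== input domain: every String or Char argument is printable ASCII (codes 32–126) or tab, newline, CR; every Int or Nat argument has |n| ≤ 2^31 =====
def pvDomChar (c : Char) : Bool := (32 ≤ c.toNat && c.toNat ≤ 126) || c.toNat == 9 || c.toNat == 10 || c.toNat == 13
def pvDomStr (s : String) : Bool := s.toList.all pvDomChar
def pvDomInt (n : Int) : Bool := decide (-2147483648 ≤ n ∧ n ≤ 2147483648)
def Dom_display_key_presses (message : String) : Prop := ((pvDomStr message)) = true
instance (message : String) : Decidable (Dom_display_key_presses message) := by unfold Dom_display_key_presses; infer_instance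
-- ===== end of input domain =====

-- B replaces A's 33-entry char-to-keypress table by closed-form keypad arithmetic on the
-- character code (key = 2 + j//3, presses = j%3+1, S/Z special-cased) — objective: alternative.

-- ===== PORT A =====
def pvKeyDict : PySem.Dict String String := PySem.Dict.mk
  [(".", "1"), (",", "11"), ("?", "111"), ("!", "1111"), (":", "11111"),
   ("A", "2"), ("B", "22"), ("C", "222"),
   ("D", "3"), ("E", "33"), ("F", "333"),
   ("G", "4"), ("H", "44"), ("I", "444"),
   ("J", "5"), ("K", "55"), ("L", "555"),
   ("M", "6"), ("N", "66"), ("O", "666"),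
   ("P", "7"), ("Q", "77"), ("R", "777"), ("S", "7777"),
   ("T", "8"), ("U", "88"), ("V", "888"),
   ("W", "9"), ("X", "99"), ("Y", "999"), ("Z", "9999"),
   (" ", "0")]

-- `[key_presses_dict[char] for char in message if char in key_presses_dict]`:
-- filter by key membership + lookup = filterMap of get? (a 1-char string key per char).
def display_key_presses (message : String) : String :=
  let m := PySem.Str.upper message
  PySem.Str.join "" (m.toList.filterMap (fun c => pvKeyDict.get? (String.ofList [c])))

-- ===== PORT B =====
-- per-character body of Source B's loop; `'A' <= ch <= 'Z'` on characters is exactly the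
-- code-point comparison 65 ≤ toNat ≤ 90; `'.,?!:'.find(ch)` for a 1-char needle is Str.find.
def pvCharPress (ch : Char) : Option String :=
  if ch = ' ' then some "0"
  else if 65 ≤ ch.toNat ∧ ch.toNat ≤ 90 then
    let i := ch.toNat - 65
    if i = 18 then some "7777"
    else if i = 25 then some "9999"
    else
      let j : Int := if i > 18 then (i : Int) - 1 else (i : Int)
      some (String.ofList (PySem.List.pyRepeat
        (PySem.Int.toStr (2 + PySem.Int.floordiv j 3)).toList (PySem.Int.mod j 3 + 1)))
  else
    let p := PySem.Str.find ".,?!:" (String.ofList [ch])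
    if p ≠ -1 then some (String.ofList (PySem.List.pyRepeat ['1'] (p + 1))) else none

def display_key_presses_alt (message : String) : String :=
  let pieces := (PySem.Str.upper message).toList.foldl
    (fun acc ch =>
      match pvCharPress ch with
      | some s => acc ++ [s]
      | none => acc) []
  PySem.Str.join "" pieces

-- ===== PRECONDITION & SPEC =====
def Spec_display_key_presses (message : String) (out : String) : Prop := out = display_key_presses_alt message
instance (message : String) (out : String) : Decidable (Spec_display_key_presses message out) := by unfold Spec_display_key_presses; infer_instance

-- ===== CLAIM =====
def Claim_equal_display_key_presses : Prop := ∀ (message : String), Dom_display_key_presses message → Spec_display_key_presses message (display_key_presses message)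

-- ===== LEMMAS AND PROOFS =====

theorem pv_char_of_toNat {c : Char} {d : Char} (h : c.toNat = d.toNat) : c = d := by
  apply Char.ext
  exact UInt32.toNat_inj.mp h

-- Per character, A's dict lookup and B's arithmetic agree.
theorem pv_perChar (c : Char) :
    pvKeyDict.get? (String.ofList [c]) = pvCharPress c := by
  by_cases h1 : c = '.'
  · subst h1; decide
  by_cases h2 : c = ','
  · subst h2; decide
  by_cases h3 : c = '?'
  · subst h3; decide
  by_cases h4 : c = '!'
  · subst h4; decide
  by_cases h5 : c = ':'
  · subst h5; decide
  by_cases h6 : c = 'A'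
  · subst h6; decide
  by_cases h7 : c = 'B'
  · subst h7; decide
  by_cases h8 : c = 'C'
  · subst h8; decide
  by_cases h9 : c = 'D'
  · subst h9; decide
  by_cases h10 : c = 'E'
  · subst h10; decide
  by_cases h11 : c = 'F'
  · subst h11; decide
  by_cases h12 : c = 'G'
  · subst h12; decide
  by_cases h13 : c = 'H'
  · subst h13; decide
  by_cases h14 : c = 'I'
  · subst h14; decide
  by_cases h15 : c = 'J'
  · subst h15; decide
  by_cases h16 : c = 'K'
  · subst h16; decide
  by_cases h17 : c = 'L'
  · subst h17; decide
  by_cases h18 : c = 'M'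
  · subst h18; decide
  by_cases h19 : c = 'N'
  · subst h19; decide
  by_cases h20 : c = 'O'
  · subst h20; decide
  by_cases h21 : c = 'P'
  · subst h21; decide
  by_cases h22 : c = 'Q'
  · subst h22; decide
  by_cases h23 : c = 'R'
  · subst h23; decide
  by_cases h24 : c = 'S'
  · subst h24; decide
  by_cases h25 : c = 'T'
  · subst h25; decide
  by_cases h26 : c = 'U'
  · subst h26; decide
  by_cases h27 : c = 'V'
  · subst h27; decide
  by_cases h28 : c = 'W'
  · subst h28; decide
  by_cases h29 : c = 'X'
  · subst h29; decide
  by_cases h30 : c = 'Y'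
  · subst h30; decide
  by_cases h31 : c = 'Z'
  · subst h31; decide
  by_cases h32 : c = ' '
  · subst h32; decide
  have m1 : c.toNat ≠ 65 := fun h => h6 (pv_char_of_toNat h)
  have m2 : c.toNat ≠ 66 := fun h => h7 (pv_char_of_toNat h)
  have m3 : c.toNat ≠ 67 := fun h => h8 (pv_char_of_toNat h)
  have m4 : c.toNat ≠ 68 := fun h => h9 (pv_char_of_toNat h)
  have m5 : c.toNat ≠ 69 := fun h => h10 (pv_char_of_toNat h)
  have m6 : c.toNat ≠ 70 := fun h => h11 (pv_char_of_toNat h)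
  have m7 : c.toNat ≠ 71 := fun h => h12 (pv_char_of_toNat h)
  have m8 : c.toNat ≠ 72 := fun h => h13 (pv_char_of_toNat h)
  have m9 : c.toNat ≠ 73 := fun h => h14 (pv_char_of_toNat h)
  have m10 : c.toNat ≠ 74 := fun h => h15 (pv_char_of_toNat h)
  have m11 : c.toNat ≠ 75 := fun h => h16 (pv_char_of_toNat h)
  have m12 : c.toNat ≠ 76 := fun h => h17 (pv_char_of_toNat h)
  have m13 : c.toNat ≠ 77 := fun h => h18 (pv_char_of_toNat h)
  have m14 : c.toNat ≠ 78 := fun h => h19 (pv_char_of_toNat h)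
  have m15 : c.toNat ≠ 79 := fun h => h20 (pv_char_of_toNat h)
  have m16 : c.toNat ≠ 80 := fun h => h21 (pv_char_of_toNat h)
  have m17 : c.toNat ≠ 81 := fun h => h22 (pv_char_of_toNat h)
  have m18 : c.toNat ≠ 82 := fun h => h23 (pv_char_of_toNat h)
  have m19 : c.toNat ≠ 83 := fun h => h24 (pv_char_of_toNat h)
  have m20 : c.toNat ≠ 84 := fun h => h25 (pv_char_of_toNat h)
  have m21 : c.toNat ≠ 85 := fun h => h26 (pv_char_of_toNat h)
  have m22 : c.toNat ≠ 86 := fun h => h27 (pv_char_of_toNat h)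
  have m23 : c.toNat ≠ 87 := fun h => h28 (pv_char_of_toNat h)
  have m24 : c.toNat ≠ 88 := fun h => h29 (pv_char_of_toNat h)
  have m25 : c.toNat ≠ 89 := fun h => h30 (pv_char_of_toNat h)
  have m26 : c.toNat ≠ 90 := fun h => h31 (pv_char_of_toNat h)
  have hr : ¬(65 ≤ c.toNat ∧ c.toNat ≤ 90) := by omega
  have hmem : c ∉ ['.', ',', '?', '!', ':'] := by simp [h1, h2, h3, h4, h5]
  have hfind : PySem.Chars.find ['.', ',', '?', '!', ':'] [c] = -1 := by
    rw [PySem.Chars.find_eq_neg_one_iff]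
    intro hinf
    exact hmem (hinf.subset (by simp))
  simp [pvKeyDict, PySem.Dict.get?, pvCharPress, hr, hfind, String.ext_iff,
        Ne.symm h1, Ne.symm h2, Ne.symm h3, Ne.symm h4, Ne.symm h5, Ne.symm h6, Ne.symm h7, Ne.symm h8, Ne.symm h9, Ne.symm h10, Ne.symm h11, Ne.symm h12, Ne.symm h13, Ne.symm h14, Ne.symm h15, Ne.symm h16, Ne.symm h17, Ne.symm h18, Ne.symm h19, Ne.symm h20, Ne.symm h21, Ne.symm h22, Ne.symm h23, Ne.symm h24, Ne.symm h25, Ne.symm h26, Ne.symm h27, Ne.symm h28, Ne.symm h29, Ne.symm h30, Ne.symm h31, Ne.symm h32, h32]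

-- B's append-accumulating foldl is filterMap.
theorem pv_foldl_filterMap (l : List Char) (acc : List String) :
    l.foldl (fun acc ch => match pvCharPress ch with | some s => acc ++ [s] | none => acc) acc
      = acc ++ l.filterMap (fun c => pvCharPress c) := by
  induction l generalizing acc with
  | nil => simp
  | cons x xs ih => cases hx : pvCharPress x <;> simp [hx, ih]

-- ===== VERDICT =====
theorem display_key_presses_spec : Claim_equal_display_key_presses := by
  intro message _
  unfold Spec_display_key_presses display_key_presses display_key_presses_alt
  rw [pv_foldl_filterMap, List.nil_append]
  exact congrArg (PySem.Str.join "") (List.filterMap_congr (fun c _ => pv_perChar c))
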